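-- pv_equiv track=rewrite | github.com/adomenig/stochastic-spatial-predator-prey | code/02_stateClassification/03b_loopDiagnostics.py | extract_state_segments
-- ===== SOURCE A (Python) =====
-- def extract_state_segments(states, coords):
--     """
--     Extract continuous coordinate segments for each state.
--     """
--     segments = {1: [], 2: [], 3: [],}
--
--     in_state = None
--     start = None
--
--     for i in range(len(states)):
--         if states[i] != in_state:
--             if in_state is not None:
--                 segments[in_state].append(coords[start:i])
--             in_state = states[i]
--             start = i
--
--     if in_state is not None:
--         segments[in_state].append(coords[start:])
--
--     return segments
-- ===== SOURCE B (Python) =====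
-- def extract_state_segments(states, coords):
--     """
--     Extract continuous coordinate segments for each state.
--
--     Recursive run-splitting: peel the leading run off both lists and recurse
--     on the remainders (instead of a single indexed pass with transition flags).
--     """
--     segments = {1: [], 2: [], 3: []}
--     _collect(states, coords, segments)
--     return segments
--
--
-- def _collect(states, coords, segments):
--     if not states:
--         return
--     s = states[0]
--     run = 1
--     for x in states[1:]:
--         if x != s:
--             break
--         run += 1
--     if run == len(states):
--         segments[s].append(coords)
--     else:
--         segments[s].append(coords[:run])
--         _collect(states[run:], coords[run:], segments)
-- ===== Notes on version B (the rewrite author's own statement) =====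
-- stated objective: alternative
-- what changed: Replaces the single indexed pass with in_state/start transition bookkeeping by a recursive decomposition that peels the leading run off states/coords and recurses on the remaining suffixes.
import Mathlib
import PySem

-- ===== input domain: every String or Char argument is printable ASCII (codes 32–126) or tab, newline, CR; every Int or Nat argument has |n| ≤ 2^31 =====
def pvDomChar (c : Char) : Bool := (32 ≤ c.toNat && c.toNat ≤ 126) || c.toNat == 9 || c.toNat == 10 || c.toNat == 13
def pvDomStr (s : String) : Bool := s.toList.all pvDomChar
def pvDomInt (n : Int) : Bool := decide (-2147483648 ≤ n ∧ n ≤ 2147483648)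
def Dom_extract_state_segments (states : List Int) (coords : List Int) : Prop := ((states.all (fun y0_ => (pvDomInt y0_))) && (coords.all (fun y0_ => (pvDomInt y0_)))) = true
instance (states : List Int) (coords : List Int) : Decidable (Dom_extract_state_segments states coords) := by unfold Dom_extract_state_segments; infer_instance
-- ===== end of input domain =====

-- B replaces A's single indexed pass (in_state/start transition bookkeeping) by a
-- recursive decomposition that peels the leading run off states/coords and recurses
-- on the remaining suffixes; same exact result, similar cost.

-- ===== PORT A =====
-- one loop iteration of A: second component of the pair is (i, states[i])
def pvStepA (coords : List Int)
    (acc : PySem.Dict Int (List (List Int)) × Option (Int × Int)) (p : Int × Int) :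
    PySem.Dict Int (List (List Int)) × Option (Int × Int) :=
  match acc.2 with
  | none => (acc.1, some (p.2, p.1))                -- states[i] != None; in_state, start := states[i], i
  | some (ins, start) =>
    if p.2 ≠ ins then
      (acc.1.modify ins [] (· ++ [PySem.List.slice coords (some start) (some p.1)]), some (p.2, p.1))
    else acc

-- the trailing 'if in_state is not None: segments[in_state].append(coords[start:])'
def pvFinishA (coords : List Int)
    (res : PySem.Dict Int (List (List Int)) × Option (Int × Int)) :
    PySem.Dict Int (List (List Int)) :=
  match res.2 with
  | none => res.1
  | some (ins, start) => res.1.modify ins [] (· ++ [PySem.List.slice coords (some start) none])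

def extract_state_segments (states : List Int) (coords : List Int) : List (Int × List (List Int)) :=
  let segments : PySem.Dict Int (List (List Int)) := PySem.Dict.ofList [(1, []), (2, []), (3, [])]
  let res := (PySem.List.pyRange 0 (PySem.List.len states) 1).foldl
      (fun acc i => pvStepA coords acc (i, PySem.List.pyGetD states i 0)) (segments, none)
  (pvFinishA coords res).items

-- ===== PORT B =====
-- port of B's 'run = 1; for x in states[1:]: if x != s: break; run += 1'
def pvRunLen (s : Int) (run : Nat) : List Int → Nat
  | [] => run
  | x :: xs => if x ≠ s then run else pvRunLen s (run + 1) xs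

theorem pvRunLen_ge (s : Int) (run : Nat) (xs : List Int) : run ≤ pvRunLen s run xs := by
  induction xs generalizing run with
  | nil => simp [pvRunLen]
  | cons x xs ih =>
    simp only [pvRunLen]
    split
    · exact le_refl _
    · exact le_trans (Nat.le_succ run) (ih (run + 1))

-- port of B's helper _collect (mutates the dict; here it returns the updated dict)
def pvCollect (segments : PySem.Dict Int (List (List Int))) (states coords : List Int) :
    PySem.Dict Int (List (List Int)) :=
  match h : states with
  | [] => segments
  | s :: rest =>
    let run := pvRunLen s 1 rest
    if run = states.length then segments.modify s [] (· ++ [coords])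
    else
      pvCollect (segments.modify s [] (· ++ [PySem.List.slice coords none (some (run : Int))]))
        (PySem.List.slice states (some (run : Int)) none)
        (PySem.List.slice coords (some (run : Int)) none)
  termination_by states.length
  decreasing_by
    have h1 : 1 ≤ pvRunLen s 1 rest := pvRunLen_ge s 1 rest
    simp [PySem.List.slice_from_natCast, h]
    omega

def extract_state_segments_alt (states : List Int) (coords : List Int) : List (Int × List (List Int)) :=
  let segments : PySem.Dict Int (List (List Int)) := PySem.Dict.ofList [(1, []), (2, []), (3, [])]
  (pvCollect segments states coords).items

-- ===== PRECONDITION & SPEC =====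
-- Pre_ excludes exactly the inputs on which the Python A raises KeyError:
-- some state value outside {1, 2, 3} (B raises KeyError there too).
def Pre_extract_state_segments (states : List Int) (coords : List Int) : Prop :=
  (states.all (fun s => s == 1 || s == 2 || s == 3)) = true
instance (states : List Int) (coords : List Int) : Decidable (Pre_extract_state_segments states coords) := by
  unfold Pre_extract_state_segments; infer_instance

def pvWitness_extract_state_segments : List Int × List Int := ([1, 1, 2, 3, 2], [10, 20, 30, 40, 50])

def Spec_extract_state_segments (states : List Int) (coords : List Int) (out : List (Int × List (List Int))) : Prop := out = extract_state_segments_alt states coords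
instance (states : List Int) (coords : List Int) (out : List (Int × List (List Int))) : Decidable (Spec_extract_state_segments states coords out) := by unfold Spec_extract_state_segments; infer_instance

-- ===== CLAIM (what is proved, stated in full; the proofs are below) =====
def Claim_equal_extract_state_segments : Prop := ∀ (states : List Int) (coords : List Int), Dom_extract_state_segments states coords → Pre_extract_state_segments states coords → Spec_extract_state_segments states coords (extract_state_segments states coords)

-- ===== LEMMAS AND PROOFS =====

-- common midpoint: element-wise recursion in absolute indices (st = start of the
-- current run, i = index of the next element, the list is states.drop i)
def pvSpec (coords : List Int) (d : PySem.Dict Int (List (List Int))) :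
    Int → Nat → Nat → List Int → PySem.Dict Int (List (List Int))
  | s, st, _, [] => d.modify s [] (· ++ [coords.drop st])
  | s, st, i, x :: xs =>
    if x = s then pvSpec coords d s st (i + 1) xs
    else pvSpec coords (d.modify s [] (· ++ [(coords.drop st).take (i - st)])) x i (i + 1) xs

theorem lemA (coords : List Int) (xs : List Int) :
    ∀ (i st : Nat) (s : Int) (d : PySem.Dict Int (List (List Int))),
    pvFinishA coords ((PySem.List.enumerate xs (i : Int)).foldl (pvStepA coords) (d, some (s, (st : Int))))
      = pvSpec coords d s st i xs := by
  induction xs with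
  | nil =>
    intro i st s d
    simp [PySem.List.enumerate_nil, pvFinishA, pvSpec, PySem.List.slice_from_natCast]
  | cons x xs ih =>
    intro i st s d
    rw [PySem.List.enumerate_cons]
    simp only [List.foldl_cons]
    by_cases hx : x = s
    · have hstep : pvStepA coords (d, some (s, (st : Int))) ((i : Int), x) = (d, some (s, (st : Int))) := by
        simp [pvStepA, hx]
      rw [hstep]
      have : ((i : Int) + 1) = ((i + 1 : Nat) : Int) := by push_cast; ring
      rw [this, ih (i + 1) st s d]
      simp [pvSpec, hx]
    · have hstep : pvStepA coords (d, some (s, (st : Int))) ((i : Int), x)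
          = (d.modify s [] (· ++ [PySem.List.slice coords (some (st : Int)) (some (i : Int))]), some (x, (i : Int))) := by
        simp [pvStepA, hx]
      rw [hstep]
      have : ((i : Int) + 1) = ((i + 1 : Nat) : Int) := by push_cast; ring
      rw [this, ih (i + 1) i x _]
      simp [pvSpec, hx, PySem.List.slice_natCast]

-- the number of further elements of the leading run
def pvRunCount (s : Int) : List Int → Nat
  | [] => 0
  | x :: xs => if x = s then pvRunCount s xs + 1 else 0

theorem pvRunLen_eq (s : Int) (xs : List Int) : ∀ run, pvRunLen s run xs = run + pvRunCount s xs := by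
  induction xs with
  | nil => intro run; simp [pvRunLen, pvRunCount]
  | cons x xs ih =>
    intro run
    by_cases hx : x = s
    · simp [pvRunLen, pvRunCount, hx, ih]; omega
    · simp [pvRunLen, pvRunCount, hx]

theorem pvRunCount_le (s : Int) (xs : List Int) : pvRunCount s xs ≤ xs.length := by
  induction xs with
  | nil => simp [pvRunCount]
  | cons x xs ih =>
    by_cases hx : x = s
    · simp [pvRunCount, hx]; omega
    · simp [pvRunCount, hx]

theorem pvRunCount_all (s : Int) (xs : List Int) (h : pvRunCount s xs = xs.length) :
    ∀ x ∈ xs, x = s := by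
  induction xs with
  | nil => simp
  | cons x xs ih =>
    by_cases hx : x = s
    · simp [pvRunCount, hx] at h
      intro y hy
      rcases List.mem_cons.mp hy with h1 | h2
      · exact h1 ▸ hx
      · exact ih (by omega) y h2
    · simp [pvRunCount, hx] at h

theorem pvRunCount_take (s : Int) (xs : List Int) :
    ∀ x ∈ xs.take (pvRunCount s xs), x = s := by
  induction xs with
  | nil => simp
  | cons x xs ih =>
    by_cases hx : x = s
    · simp only [pvRunCount, if_pos hx, List.take_succ_cons]
      intro y hy
      rcases List.mem_cons.mp hy with h1 | h2
      · exact h1 ▸ hx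
      · exact ih y h2
    · simp [pvRunCount, hx]

theorem pvRunCount_drop (s : Int) (xs : List Int) (h : pvRunCount s xs < xs.length) :
    ∃ y rest, xs.drop (pvRunCount s xs) = y :: rest ∧ y ≠ s := by
  induction xs with
  | nil => simp at h
  | cons x xs ih =>
    by_cases hx : x = s
    · simp only [pvRunCount, if_pos hx, List.length_cons] at h ⊢
      simpa using ih (by omega)
    · exact ⟨x, xs, by simp [pvRunCount, hx], hx⟩

theorem pvSpec_all (coords : List Int) (s : Int) (xs : List Int) (h : ∀ x ∈ xs, x = s) :
    ∀ (st i : Nat) (d : PySem.Dict Int (List (List Int))),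
    pvSpec coords d s st i xs = d.modify s [] (· ++ [coords.drop st]) := by
  induction xs with
  | nil => intro st i d; simp [pvSpec]
  | cons x xs ih =>
    intro st i d
    have hx : x = s := h x (List.mem_cons_self)
    simp only [pvSpec, if_pos hx]
    exact ih (fun y hy => h y (List.mem_cons_of_mem _ hy)) st (i + 1) d

theorem pvSpec_skip (coords : List Int) (s : Int) (pre : List Int) (h : ∀ x ∈ pre, x = s) :
    ∀ (ys : List Int) (st i : Nat) (d : PySem.Dict Int (List (List Int))),
    pvSpec coords d s st i (pre ++ ys) = pvSpec coords d s st (i + pre.length) ys := by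
  induction pre with
  | nil => intro ys st i d; simp
  | cons x pre ih =>
    intro ys st i d
    have hx : x = s := h x (List.mem_cons_self)
    simp only [List.cons_append, pvSpec, if_pos hx]
    rw [ih (fun y hy => h y (List.mem_cons_of_mem _ hy)) ys st (i + 1) d]
    have hL : i + (x :: pre).length = i + 1 + pre.length := by
      simp [List.length_cons]; omega
    rw [hL]

theorem lemB (coords : List Int) : ∀ (n : Nat) (xs : List Int), xs.length ≤ n →
    ∀ (s : Int) (st : Nat) (d : PySem.Dict Int (List (List Int))),
    pvCollect d (s :: xs) (coords.drop st) = pvSpec coords d s st (st + 1) xs := by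
  intro n
  induction n with
  | zero =>
    intro xs hlen s st d
    have hxs : xs = [] := List.eq_nil_of_length_eq_zero (by omega)
    subst hxs
    simp [pvCollect, pvRunLen, pvSpec]
  | succ n ih =>
    intro xs hlen s st d
    set k := pvRunCount s xs with hk
    have hrun : pvRunLen s 1 xs = 1 + k := pvRunLen_eq s xs 1
    have hkle : k ≤ xs.length := pvRunCount_le s xs
    by_cases hfull : pvRunLen s 1 xs = (s :: xs).length
    · -- whole list is one run
      have hall : ∀ x ∈ xs, x = s := pvRunCount_all s xs (by simp at hfull; omega)
      rw [pvCollect]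
      rw [if_pos hfull]
      exact (pvSpec_all coords s xs hall st (st + 1) d).symm
    · have hklt : k < xs.length := by
        simp only [List.length_cons] at hfull
        omega
      obtain ⟨y, rest, hdrop, hy⟩ := pvRunCount_drop s xs hklt
      rw [pvCollect]
      simp only [if_neg hfull]
      -- the three slice arguments
      have hs1 : PySem.List.slice (coords.drop st) none (some ((pvRunLen s 1 xs : Nat) : Int))
          = (coords.drop st).take (1 + k) := by
        rw [hrun]; exact PySem.List.slice_to_natCast _ _
      have hs2 : PySem.List.slice (s :: xs) (some ((pvRunLen s 1 xs : Nat) : Int)) none = y :: rest := by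
        rw [hrun, PySem.List.slice_from_natCast]
        have h11 : 1 + k = k + 1 := by omega
        rw [h11, List.drop_succ_cons, hdrop]
      have hs3 : PySem.List.slice (coords.drop st) (some ((pvRunLen s 1 xs : Nat) : Int)) none
          = coords.drop (st + (1 + k)) := by
        rw [hrun, PySem.List.slice_from_natCast, List.drop_drop]
      rw [hs1, hs2, hs3]
      have hrest : rest.length ≤ n := by
        have : (xs.drop k).length = xs.length - k := List.length_drop
        rw [hdrop] at this
        simp at this
        omega
      rw [ih rest hrest y (st + (1 + k)) _]
      -- right-hand side: walk through the k leading run elements, then the transition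
      have hsplit : xs = xs.take k ++ (y :: rest) := by
        conv_lhs => rw [← List.take_append_drop k xs, hdrop]
      rw [hsplit, pvSpec_skip coords s (xs.take k) (pvRunCount_take s xs)]
      have hlen_take : (xs.take k).length = k := List.length_take_of_le (le_of_lt hklt)
      rw [hlen_take]
      simp only [pvSpec, if_neg hy]
      have h1 : st + 1 + k - st = 1 + k := by omega
      have h2 : st + (1 + k) = st + 1 + k := by omega
      rw [h1, h2]

-- ===== VERDICT (by name: the statement is the Claim_ definition above) =====
theorem extract_state_segments_spec : Claim_equal_extract_state_segments := by
  intro states coords _ _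
  unfold Spec_extract_state_segments
  cases states with
  | nil =>
    simp [extract_state_segments, extract_state_segments_alt, pvCollect, pvFinishA, pysem]
  | cons x xs =>
    show (pvFinishA coords _).items = (pvCollect _ (x :: xs) coords).items
    congr 1
    have henum : PySem.List.enumerate (x :: xs) 0
        = (PySem.List.pyRange 0 (PySem.List.len (x :: xs)) 1).map
            (fun j => (j, PySem.List.pyGetD (x :: xs) j 0)) :=
      PySem.List.enumerate_eq_map_pyRange (x :: xs) 0
    have hfold : (PySem.List.pyRange 0 (PySem.List.len (x :: xs)) 1).foldl
        (fun acc i => pvStepA coords acc (i, PySem.List.pyGetD (x :: xs) i 0))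
        (PySem.Dict.ofList [(1, []), (2, []), (3, [])], none)
        = (PySem.List.enumerate (x :: xs) 0).foldl (pvStepA coords)
          (PySem.Dict.ofList [(1, []), (2, []), (3, [])], none) := by
      rw [henum, List.foldl_map]
    rw [hfold, PySem.List.enumerate_cons]
    simp only [List.foldl_cons]
    have hstep : pvStepA coords (PySem.Dict.ofList [(1, []), (2, []), (3, [])], none) ((0 : Int), x)
        = (PySem.Dict.ofList [(1, []), (2, []), (3, [])], some (x, (0 : Int))) := by
      simp [pvStepA]
    rw [hstep]
    have h0 : ((0 : Int) + 1) = ((1 : Nat) : Int) := by norm_num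
    have h0' : (0 : Int) = ((0 : Nat) : Int) := by norm_num
    rw [h0, h0', lemA coords xs 1 0 x _]
    have := lemB coords xs.length xs (le_refl _) x 0 (PySem.Dict.ofList [(1, []), (2, []), (3, [])])
    simpa using this.symm
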